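-- pv_equiv track=rewrite | github.com/GolzitskyNikolay/SPEAC-analysis | speac/speac_chapter_7/speac.py | find_it_in_chord
-- ===== SOURCE A (Python) =====
-- def find_it_in_chord(interval, chord):
--     size = len(chord)
--     for i in range(1, size):
--         pitch = chord[0]
--         if len(chord) > 1:
--             next_pitch = chord[1]
--             diff = next_pitch - pitch
--             if diff % 12 == interval:
--                 return [next_pitch, pitch]
--         chord.pop(0)
--     # В коде на LISP происходит чудо, там (mod -5 11) даст результат 6 (типа 11 - 5)...
--     return None
-- ===== SOURCE B (Python) =====
-- def find_it_in_chord(interval, chord):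
--     for i in range(len(chord) - 1):
--         p, q = chord[i], chord[i + 1]
--         if (q - p) % 12 == interval:
--             del chord[:i]          # same observable mutation as A's repeated pop(0)
--             return [q, p]
--     del chord[:len(chord) - 1]     # A pops all but the last element when no pair matches
--     return None
-- ===== Notes on version B (the rewrite author's own statement) =====
-- stated objective: faster
-- what changed: Replaces the destructive loop that re-reads chord[0]/chord[1] and pops the front each iteration with a single index scan over adjacent pairs, replicating the mutation once via a slice delete.
import Mathlib
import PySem

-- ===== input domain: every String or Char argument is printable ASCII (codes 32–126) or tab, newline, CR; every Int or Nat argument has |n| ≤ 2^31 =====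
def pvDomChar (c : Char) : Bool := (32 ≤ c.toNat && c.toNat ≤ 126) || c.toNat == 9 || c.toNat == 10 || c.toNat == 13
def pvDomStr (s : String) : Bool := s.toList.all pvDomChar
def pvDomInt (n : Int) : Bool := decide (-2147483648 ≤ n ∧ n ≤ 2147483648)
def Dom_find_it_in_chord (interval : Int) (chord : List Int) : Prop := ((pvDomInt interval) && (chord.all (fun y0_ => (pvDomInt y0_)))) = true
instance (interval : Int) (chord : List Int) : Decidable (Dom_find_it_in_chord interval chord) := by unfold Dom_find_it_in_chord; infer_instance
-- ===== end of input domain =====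

-- B replaces A's pop(0) loop by a single index scan (O(n) instead of O(n^2));
-- A mutates `chord` in place (pop(0)) and B replays the same mutation with one slice delete;
-- the equivalence proved here is about the RETURN value.
-- ===== PORT A =====
-- loop over `for i in range(1, size)` with the shrinking chord as state; fuel = remaining iterations
def find_it_in_chord_loop (interval : Int) : Nat → List Int → Option (List Int)
  | 0, _ => none
  | n + 1, chord =>
    match chord with
    | pitch :: next_pitch :: _ =>
      if PySem.Int.mod (next_pitch - pitch) 12 == interval then some [next_pitch, pitch]
      else find_it_in_chord_loop interval n (chord.drop 1)   -- chord.pop(0)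
    | _ => find_it_in_chord_loop interval n (chord.drop 1)

def find_it_in_chord (interval : Int) (chord : List Int) : Option (List Int) :=
  find_it_in_chord_loop interval (chord.length - 1) chord    -- range(1, size) runs size-1 times

-- ===== PORT B =====
-- index scan: for i in range(len(chord) - 1)
def find_it_in_chord_alt_go (interval : Int) (chord : List Int) (i : Nat) : Option (List Int) :=
  if h : i + 1 < chord.length then
    let p := chord[i]
    let q := chord[i + 1]
    if PySem.Int.mod (q - p) 12 == interval then some [q, p]
    else find_it_in_chord_alt_go interval chord (i + 1)
  else none
termination_by chord.length - i

def find_it_in_chord_alt (interval : Int) (chord : List Int) : Option (List Int) :=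
  find_it_in_chord_alt_go interval chord 0

-- ===== PRECONDITION & SPEC =====
def Spec_find_it_in_chord (interval : Int) (chord : List Int) (out : Option (List Int)) : Prop := out = find_it_in_chord_alt interval chord
instance (interval : Int) (chord : List Int) (out : Option (List Int)) : Decidable (Spec_find_it_in_chord interval chord out) := by unfold Spec_find_it_in_chord; infer_instance

-- ===== CLAIM (what is proved, stated in full; the proofs are below) =====
def Claim_equal_find_it_in_chord : Prop := ∀ (interval : Int) (chord : List Int), Dom_find_it_in_chord interval chord → Spec_find_it_in_chord interval chord (find_it_in_chord interval chord)

-- ===== LEMMAS AND PROOFS =====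

lemma loop_eq_go (interval : Int) (chord : List Int) :
    ∀ (k i : Nat), k = chord.length - 1 - i →
      find_it_in_chord_loop interval k (chord.drop i) = find_it_in_chord_alt_go interval chord i := by
  intro k
  induction k with
  | zero =>
    intro i hk
    rw [find_it_in_chord_alt_go]
    simp only [find_it_in_chord_loop]
    have : ¬ i + 1 < chord.length := by omega
    simp [this]
  | succ n ih =>
    intro i hk
    have hi : i + 1 < chord.length := by omega
    have hi0 : i < chord.length := by omega
    rw [List.drop_eq_getElem_cons hi0, List.drop_eq_getElem_cons hi]
    rw [find_it_in_chord_alt_go]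
    simp only [find_it_in_chord_loop, hi, dif_pos]
    simp only [beq_iff_eq, List.drop_succ_cons]
    split_ifs with hm
    · rfl
    · rw [← List.drop_eq_getElem_cons hi]
      exact ih (i + 1) (by omega)

-- ===== VERDICT (by name: the statement is the Claim_ definition above) =====
theorem find_it_in_chord_spec : Claim_equal_find_it_in_chord := by
  intro interval chord _
  unfold Spec_find_it_in_chord find_it_in_chord find_it_in_chord_alt
  simpa using loop_eq_go interval chord (chord.length - 1) 0 (by omega)
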